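-- pv_equiv track=rewrite | github.com/iamfrankie/Chong-Shing-HKEX-Project | Auditreport.py | remove_subtotal
-- ===== SOURCE A (Python) =====
-- def remove_subtotal(li:list) -> list:
--
--     li_copy = li.copy()
--     ## remove sub-totals
--     for idx, x in enumerate(li):
--         check_idx = -idx - 1
--         check_li, check_total = li[:check_idx], li[check_idx]
--         check_sum = 0
--         for i in check_li[::-1]:
--             check_sum += i
--             if check_sum == check_total:
--                 li_copy.remove(check_total)
--                 break
--     return li_copy
-- ===== SOURCE B (Python) =====
-- def remove_subtotal(li: list) -> list:
--     # One pass with running prefix sums: element x at position j is a sub-total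
--     # iff some earlier prefix sum equals (prefix_sum_before_x - x); count how many
--     # removals each value earns, then one pass keeps all but the first such occurrences.
--     seen = set()
--     p = 0
--     cnt = {}
--     for x in li:
--         if p - x in seen:
--             cnt[x] = cnt.get(x, 0) + 1
--         seen.add(p)
--         p += x
--     out = []
--     for x in li:
--         if cnt.get(x, 0) > 0:
--             cnt[x] = cnt[x] - 1
--         else:
--             out.append(x)
--     return out
-- ===== Notes on version B (the rewrite author's own statement) =====
-- stated objective: faster
-- what changed: A rescans all contiguous blocks before each element (quadratic) and removes by value one at a time; B makes one pass keeping a set of running prefix sums to count, per value, how many removals are due, then a second pass that skips that many first occurrences.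
import Mathlib
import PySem

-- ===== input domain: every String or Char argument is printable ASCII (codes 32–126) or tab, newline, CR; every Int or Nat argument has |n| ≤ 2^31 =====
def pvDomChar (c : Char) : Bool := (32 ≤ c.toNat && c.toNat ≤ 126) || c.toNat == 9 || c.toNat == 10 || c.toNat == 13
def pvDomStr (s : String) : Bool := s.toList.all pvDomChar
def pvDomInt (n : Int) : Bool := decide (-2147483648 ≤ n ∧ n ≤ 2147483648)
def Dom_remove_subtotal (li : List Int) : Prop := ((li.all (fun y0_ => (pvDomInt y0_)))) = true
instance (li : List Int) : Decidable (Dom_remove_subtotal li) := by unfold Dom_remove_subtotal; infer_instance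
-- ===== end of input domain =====

-- B replaces A's quadratic rescan of all blocks before each element by one pass over running
-- prefix sums with a set, counting removals per value, then one pass skipping those occurrences.

-- ===== PORT A =====
-- inner loop 'for i in check_li[::-1]: check_sum += i; if check_sum == check_total: … break'
-- (returns whether the break fired; the removal itself is done by the caller, as in A)
def innerFindA (rev : List Int) (total : Int) (s : Int) : Bool :=
  match rev with
  | [] => false
  | i :: rest => if s + i = total then true else innerFindA rest total (s + i)

-- one iteration of A's outer loop (idx = p.1 of enumerate; only idx is used by the body)
def stepA (li li_copy : List Int) (idx : Int) : List Int :=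
  let check_idx : Int := -idx - 1
  -- li[:check_idx]; li[check_idx] never raises here (0 ≤ idx < len li), so the default 0 is unreachable;
  -- check_li[::-1] is check_li.reverse (PySem.List.slice?_none_none_neg_one)
  let check_li := PySem.List.slice li none (some check_idx)
  let check_total := PySem.List.pyGetD li check_idx 0
  if innerFindA check_li.reverse check_total 0 then
    -- li_copy.remove(check_total) never raises here (the value is still present): getD unreachable
    (PySem.List.remove? li_copy check_total).getD li_copy
  else li_copy

def remove_subtotal (li : List Int) : List Int :=
  (PySem.List.enumerate li).foldl (fun li_copy p => stepA li li_copy p.1) li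

-- ===== PORT B =====
def remove_subtotal_alt (li : List Int) : List Int :=
  -- pass 1: acc = (seen prefix sums, running prefix sum p, removal counts cnt)
  let st :=
    li.foldl
      (fun (acc : PySem.Set Int × Int × PySem.Dict Int Int) x =>
        (PySem.Set.add acc.1 acc.2.1,
         acc.2.1 + x,
         if PySem.Set.contains acc.1 (acc.2.1 - x) then
           acc.2.2.insert x (acc.2.2.getD x 0 + 1)
         else acc.2.2))
      (PySem.Set.empty, 0, PySem.Dict.empty)
  -- pass 2: acc = (cnt, out); skip x while cnt[x] > 0, else append
  (li.foldl
      (fun (acc : PySem.Dict Int Int × List Int) x =>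
        if acc.1.getD x 0 > 0 then (acc.1.insert x (acc.1.getD x 0 - 1), acc.2)
        else (acc.1, acc.2 ++ [x]))
      (st.2.2, [])).2

-- ===== PRECONDITION & SPEC =====
def Spec_remove_subtotal (li : List Int) (out : List Int) : Prop := out = remove_subtotal_alt li
instance (li : List Int) (out : List Int) : Decidable (Spec_remove_subtotal li out) := by unfold Spec_remove_subtotal; infer_instance

-- ===== CLAIM (what is proved, stated in full; the proofs are below) =====
def Claim_equal_remove_subtotal : Prop := ∀ (li : List Int), Dom_remove_subtotal li → Spec_remove_subtotal li (remove_subtotal li)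

-- ===== LEMMAS AND PROOFS =====

-- prefix sums of l: sums of l.take k for k < l.length
def psums (l : List Int) : List Int := (List.range l.length).map (fun k => (l.take k).sum)

-- is x the sum of some contiguous block of l ending at l's end (l = the prefix before x)?
def flagc (l : List Int) (x : Int) : Bool := decide ((l.sum - x) ∈ psums l)

-- the flagged values of rest, in position order, given the already-seen prefix pre
def wsOf (pre rest : List Int) : List Int :=
  match rest with
  | [] => []
  | x :: r => (if flagc pre x then [x] else []) ++ wsOf (pre ++ [x]) r

theorem psums_append_singleton (l : List Int) (x : Int) :
    psums (l ++ [x]) = psums l ++ [l.sum] := by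
  simp [psums, List.range_succ]
  intro a ha
  rw [List.take_append_of_le_length (le_of_lt ha)]

theorem innerFindA_iff (rev : List Int) (t s : Int) :
    innerFindA rev t s = true ↔ ∃ m < rev.length, s + ((rev.take (m+1)).sum) = t := by
  induction rev generalizing s with
  | nil => simp [innerFindA]
  | cons i rest ih =>
    simp only [innerFindA]
    split
    · rename_i h
      simp only [true_iff]
      exact ⟨0, by simp, by simpa using h⟩
    · rename_i h
      rw [ih]
      constructor
      · rintro ⟨m, hm, hsum⟩
        exact ⟨m+1, by simpa using Nat.succ_lt_succ hm, by simpa [add_assoc] using hsum⟩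
      · rintro ⟨m, hm, hsum⟩
        match m with
        | 0 => exact absurd (by simpa using hsum) h
        | m+1 =>
          exact ⟨m, by simpa using hm, by simpa [add_assoc] using hsum⟩

theorem sum_take_reverse (l : List Int) (n : Nat) :
    (l.reverse.take n).sum = l.sum - (l.take (l.length - n)).sum := by
  rw [List.take_reverse, List.sum_reverse]
  have := List.sum_take_add_sum_drop l (l.length - n)
  omega

theorem innerFindA_eq_flagc (l : List Int) (v : Int) :
    innerFindA l.reverse v 0 = flagc l v := by
  rw [Bool.eq_iff_iff, innerFindA_iff]
  simp only [flagc, decide_eq_true_iff, psums, List.mem_map, List.mem_range,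
    List.length_reverse]
  constructor
  · rintro ⟨m, hm, hsum⟩
    refine ⟨l.length - (m+1), by omega, ?_⟩
    rw [sum_take_reverse] at hsum
    omega
  · rintro ⟨k, hk, hsum⟩
    refine ⟨l.length - k - 1, by omega, ?_⟩
    rw [sum_take_reverse]
    have : l.length - (l.length - k - 1 + 1) = k := by omega
    rw [this]
    omega

theorem reverse_range (n : Nat) : (List.range n).reverse = (List.range n).map (fun k => n-1-k) := by
  induction n with
  | zero => simp
  | succ n ih =>
    conv_rhs => rw [List.range_succ_eq_map]
    rw [List.range_succ, List.reverse_append]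
    simp only [List.map_cons, List.map_map, Function.comp_def]
    rw [List.map_congr_left (g := fun k => n - 1 - k)
      (fun k _ => by show n + 1 - 1 - (k + 1) = n - 1 - k; omega)]
    simp [ih]

theorem removeD_eq_erase (c : List Int) (v : Int) :
    (PySem.List.remove? c v).getD c = c.erase v := by
  by_cases h : v ∈ c
  · rw [PySem.List.remove?_eq_some_erase c v h, Option.getD_some]
  · rw [(PySem.List.remove?_eq_none_iff c v).mpr h, Option.getD_none, List.erase_of_not_mem h]

theorem wsOf_eq_range (rest : List Int) (pre : List Int) :
    wsOf pre rest =
      ((List.range rest.length).filter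
        (fun i => flagc (pre ++ rest.take i) (rest.getD i 0))).map (fun i => rest.getD i 0) := by
  induction rest generalizing pre with
  | nil => simp [wsOf]
  | cons x r ih =>
    rw [wsOf, ih (pre ++ [x])]
    conv_rhs => rw [List.length_cons, List.range_succ_eq_map]
    rw [List.filter_cons]
    simp only [List.take_zero, List.append_nil, List.getD_cons_zero, List.filter_map,
      Function.comp_def, List.take_succ_cons, List.getD_cons_succ]
    have harr : ∀ i : Nat, pre ++ x :: List.take i r = pre ++ [x] ++ List.take i r := by
      intro i; simp
    simp only [harr]
    split <;> simp [List.map_map, Function.comp_def]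

theorem stepA_eval (li c : List Int) (k : Nat) (hk : k < li.length) :
    stepA li c (0 + (k : Int)) =
      if flagc (li.take (li.length - 1 - k)) (li.getD (li.length - 1 - k) 0) then
        c.erase (li.getD (li.length - 1 - k) 0)
      else c := by
  show (if innerFindA (PySem.List.slice li none (some (-(0 + (k:Int)) - 1))).reverse
          (PySem.List.pyGetD li (-(0 + (k:Int)) - 1) 0) 0 then
        (PySem.List.remove? c (PySem.List.pyGetD li (-(0 + (k:Int)) - 1) 0)).getD c
      else c) = _
  have hx : -(0 + (k : Int)) - 1 = -((k+1 : Nat) : Int) := by push_cast; ring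
  have hj : li.length - (k+1) = li.length - 1 - k := by omega
  rw [hx, PySem.List.slice_to_neg_natCast li (k+1) (by omega),
    PySem.List.pyGetD_neg_natCast li (k+1) 0 (by omega) (by omega),
    ← List.getD_eq_getElem li 0 (by omega : li.length - (k+1) < li.length)]
  simp only [hj]
  rw [innerFindA_eq_flagc, removeD_eq_erase]

theorem portA_eq_diff (li : List Int) :
    remove_subtotal li = li.diff (wsOf [] li).reverse := by
  unfold remove_subtotal
  rw [← List.foldl_map (f := fun p : Int × Int => p.1) (g := fun c idx => stepA li c idx),
    PySem.List.map_fst_enumerate, PySem.List.pyRange_one,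
    List.foldl_map]
  have hlen : ((0 : Int) + (li.length : Int) - 0).toNat = li.length := by omega
  rw [hlen]
  have hcongr := PySem.List.foldl_congr_mem (l := List.range li.length) (init := li)
    (f := fun c (k : Nat) => stepA li c (0 + (k : Int)))
    (g := fun c (k : Nat) =>
      if flagc (li.take (li.length - 1 - k)) (li.getD (li.length - 1 - k) 0) then
        c.erase (li.getD (li.length - 1 - k) 0)
      else c)
    (fun c k hk => stepA_eval li c k (List.mem_range.mp hk))
  rw [hcongr]
  have hfil := PySem.List.foldl_if_eq_foldl_filter (l := List.range li.length) (init := li)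
    (p := fun k : Nat => flagc (li.take (li.length - 1 - k)) (li.getD (li.length - 1 - k) 0))
    (f := fun c (k : Nat) => c.erase (li.getD (li.length - 1 - k) 0))
  rw [hfil,
    ← List.foldl_map (f := fun k : Nat => li.getD (li.length - 1 - k) 0) (g := List.erase),
    ← List.diff_eq_foldl]
  congr 1
  rw [wsOf_eq_range li []]
  simp only [List.nil_append]
  rw [← List.map_reverse, ← List.filter_reverse, reverse_range, List.filter_map, List.map_map]
  simp only [Function.comp_def]

theorem contains_ofList_psums (pre : List Int) (x : Int) :
    PySem.Set.contains (PySem.Set.ofList (psums pre)) (pre.sum - x) = flagc pre x := by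
  rw [Bool.eq_iff_iff, PySem.Set.contains_iff, PySem.Set.mem_ofList]
  simp [flagc]

theorem phase1_counts (rest : List Int) (pre : List Int) (cnt : PySem.Dict Int Int) (v : Int) :
    ((rest.foldl
      (fun (acc : PySem.Set Int × Int × PySem.Dict Int Int) x =>
        (PySem.Set.add acc.1 acc.2.1,
         acc.2.1 + x,
         if PySem.Set.contains acc.1 (acc.2.1 - x) then
           acc.2.2.insert x (acc.2.2.getD x 0 + 1)
         else acc.2.2))
      (PySem.Set.ofList (psums pre), pre.sum, cnt)).2.2).getD v 0
      = cnt.getD v 0 + ((wsOf pre rest).count v : Int) := by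
  induction rest generalizing pre cnt with
  | nil => simp [wsOf]
  | cons x r ih =>
    rw [List.foldl_cons]
    have h1 : PySem.Set.add (PySem.Set.ofList (psums pre)) pre.sum
        = PySem.Set.ofList (psums (pre ++ [x])) := by
      rw [psums_append_singleton, PySem.Set.ofList_append_singleton]
    have h2 : pre.sum + x = (pre ++ [x]).sum := by simp
    simp only [contains_ofList_psums, h1, h2]
    by_cases hf : flagc pre x
    · rw [if_pos hf, ih (pre ++ [x])]
      rw [PySem.Dict.getD_insert, wsOf]
      rw [if_pos hf]
      simp only [List.count_append, List.count_singleton]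
      by_cases hv : v = x
      · subst hv; simp; ring
      · rw [if_neg hv]
        have hxv : (x == v) = false := by
          simp only [beq_eq_false_iff_ne, ne_eq]
          exact fun h => hv h.symm
        simp [hxv]
    · rw [if_neg hf, ih (pre ++ [x])]
      rw [wsOf, if_neg hf]
      simp

-- B's pass 2, as structural recursion on the list
def skipRec (cnt : PySem.Dict Int Int) (l : List Int) : List Int :=
  match l with
  | [] => []
  | x :: r =>
    if cnt.getD x 0 > 0 then skipRec (cnt.insert x (cnt.getD x 0 - 1)) r
    else x :: skipRec cnt r

theorem phase2_eq_skipRec (l : List Int) (cnt : PySem.Dict Int Int) (out : List Int) :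
    (l.foldl
      (fun (acc : PySem.Dict Int Int × List Int) x =>
        if acc.1.getD x 0 > 0 then (acc.1.insert x (acc.1.getD x 0 - 1), acc.2)
        else (acc.1, acc.2 ++ [x]))
      (cnt, out)).2 = out ++ skipRec cnt l := by
  induction l generalizing cnt out with
  | nil => simp [skipRec]
  | cons x r ih =>
    rw [List.foldl_cons, skipRec]
    by_cases h : cnt.getD x 0 > 0
    · rw [if_pos h]
      simp only [if_pos h]
      exact ih _ _
    · rw [if_neg h]
      simp only [if_neg h]
      rw [ih _ _, List.append_assoc]
      rfl

theorem skipRec_eq_diff (l : List Int) (ws : List Int) (cnt : PySem.Dict Int Int)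
    (h : ∀ v, cnt.getD v 0 = (ws.count v : Int)) : skipRec cnt l = l.diff ws := by
  induction l generalizing ws cnt with
  | nil => simp [skipRec]
  | cons x r ih =>
    rw [skipRec]
    by_cases hx : x ∈ ws
    · have hc : cnt.getD x 0 > 0 := by
        rw [h x]
        exact_mod_cast List.count_pos_iff.mpr hx
      rw [if_pos hc, List.cons_diff_of_mem hx]
      apply ih
      intro v
      rw [PySem.Dict.getD_insert, List.count_erase, h v, h x]
      by_cases hv : v = x
      · subst hv
        simp only [BEq.rfl, if_true]
        have := List.count_pos_iff.mpr hx
        omega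
      · have hxv : (x == v) = false := by
          simp only [beq_eq_false_iff_ne, ne_eq]
          exact fun h => hv h.symm
        rw [if_neg hv, hxv]
        simp
    · have hc : ¬ cnt.getD x 0 > 0 := by
        rw [h x, List.count_eq_zero_of_not_mem hx]
        simp
      rw [if_neg hc, List.cons_diff_of_not_mem hx, ih ws cnt h]

theorem portB_eq_diff (li : List Int) :
    remove_subtotal_alt li = li.diff (wsOf [] li) := by
  have hinit : ((PySem.Set.empty : PySem.Set Int), (0 : Int), (PySem.Dict.empty : PySem.Dict Int Int))
      = (PySem.Set.ofList (psums ([] : List Int)), ([] : List Int).sum, PySem.Dict.empty) := by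
    simp [psums, PySem.Set.ofList, PySem.Set.empty]
  show (li.foldl _
      ((li.foldl _ ((PySem.Set.empty : PySem.Set Int), (0 : Int), (PySem.Dict.empty : PySem.Dict Int Int))).2.2, ([] : List Int))).2 = _
  rw [hinit, phase2_eq_skipRec, List.nil_append]
  apply skipRec_eq_diff
  intro v
  rw [phase1_counts]
  simp

-- ===== VERDICT (by name: the statement is the Claim_ definition above) =====
theorem remove_subtotal_spec : Claim_equal_remove_subtotal := by
  intro li _
  show remove_subtotal li = remove_subtotal_alt li
  rw [portA_eq_diff, portB_eq_diff]
  exact List.Perm.diff_left li ((wsOf [] li).reverse_perm)
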